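-- pv_equiv track=rewrite | github.com/quantumlib/Cirq | dev_tools/pr_monitor.py | get_pr_size_label
-- ===== SOURCE A (Python) =====
-- PR_SIZE_LABELS = ['size: U', 'size: XS', 'size: S', 'size: M', 'size: L', 'size: XL']
--
-- PR_SIZES = [0, 10, 50, 250, 1000, 1 << 30]
--
-- def get_pr_size_label(tot_changes: int) -> str:
--     i = 0
--     ret = ''
--     while i < len(PR_SIZES):
--         if tot_changes < PR_SIZES[i]:
--             ret = PR_SIZE_LABELS[i]
--             break
--         i += 1
--     return ret
-- ===== SOURCE B (Python) =====
-- import bisect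
--
-- PR_SIZE_LABELS = ['size: U', 'size: XS', 'size: S', 'size: M', 'size: L', 'size: XL']
--
-- PR_SIZES = [0, 10, 50, 250, 1000, 1 << 30]
--
-- def get_pr_size_label(tot_changes: int) -> str:
--     i = bisect.bisect_right(PR_SIZES, tot_changes)
--     return PR_SIZE_LABELS[i] if i < len(PR_SIZE_LABELS) else ''
-- ===== Notes on version B (the rewrite author's own statement) =====
-- stated objective: idiomatic
-- what changed: Replaces the linear while-loop scan over the threshold table with a binary search (bisect.bisect_right) into the sorted PR_SIZES table, returning '' when the index runs off the end.
import Mathlib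
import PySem

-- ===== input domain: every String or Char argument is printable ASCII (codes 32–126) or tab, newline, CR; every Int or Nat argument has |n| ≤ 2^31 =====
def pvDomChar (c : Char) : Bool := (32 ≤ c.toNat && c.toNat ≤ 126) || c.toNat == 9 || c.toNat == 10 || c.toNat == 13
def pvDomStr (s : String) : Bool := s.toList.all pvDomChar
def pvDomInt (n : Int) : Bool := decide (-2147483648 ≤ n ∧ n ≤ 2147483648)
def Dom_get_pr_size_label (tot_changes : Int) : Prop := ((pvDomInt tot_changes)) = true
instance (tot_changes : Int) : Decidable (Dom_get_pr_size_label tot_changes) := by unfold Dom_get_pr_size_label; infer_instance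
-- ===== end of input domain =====

-- B replaces A's linear while-loop scan of the sorted threshold table with a bisect_right binary search (idiomatic; same result).


-- ===== PORT A =====
def PR_SIZE_LABELS : List String := ["size: U", "size: XS", "size: S", "size: M", "size: L", "size: XL"]

def PR_SIZES : List Int := [0, 10, 50, 250, 1000, 1073741824]

-- the while-loop: i counts up; ret stays '' unless a threshold exceeds tot_changes
def get_pr_size_label_go (tot_changes : Int) (i : Nat) : String :=
  if i < PR_SIZES.length then
    if tot_changes < PR_SIZES.getD i 0 then PR_SIZE_LABELS.getD i ""
    else get_pr_size_label_go tot_changes (i + 1)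
  else ""
termination_by PR_SIZES.length - i

def get_pr_size_label (tot_changes : Int) : String :=
  get_pr_size_label_go tot_changes 0

-- ===== PORT B =====
-- bisect.bisect_right on the sorted table
def pvBisectRight (xs : List Int) (x : Int) (lo hi : Nat) : Nat :=
  if lo < hi then
    let mid := (lo + hi) / 2
    if x < xs.getD mid 0 then pvBisectRight xs x lo mid
    else pvBisectRight xs x (mid + 1) hi
  else lo
termination_by hi - lo
decreasing_by all_goals omega

def get_pr_size_label_alt (tot_changes : Int) : String :=
  let i := pvBisectRight PR_SIZES tot_changes 0 PR_SIZES.length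
  if i < PR_SIZE_LABELS.length then PR_SIZE_LABELS.getD i "" else ""

-- ===== PRECONDITION & SPEC =====
def Spec_get_pr_size_label (tot_changes : Int) (out : String) : Prop := out = get_pr_size_label_alt tot_changes
instance (tot_changes : Int) (out : String) : Decidable (Spec_get_pr_size_label tot_changes out) := by unfold Spec_get_pr_size_label; infer_instance

-- ===== CLAIM (what is proved, stated in full; the proofs are below) =====
def Claim_equal_get_pr_size_label : Prop := ∀ (tot_changes : Int), Dom_get_pr_size_label tot_changes → Spec_get_pr_size_label tot_changes (get_pr_size_label tot_changes)

-- ===== LEMMAS AND PROOFS =====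

-- evaluation of A's loop at each index
theorem goA6 (t : Int) : get_pr_size_label_go t 6 = "" := by
  rw [get_pr_size_label_go]; simp [PR_SIZES]
theorem goA5 (t : Int) : get_pr_size_label_go t 5 =
    (if t < 1073741824 then "size: XL" else "") := by
  rw [get_pr_size_label_go, goA6]; simp [PR_SIZES, PR_SIZE_LABELS]
theorem goA4 (t : Int) : get_pr_size_label_go t 4 =
    (if t < 1000 then "size: L" else if t < 1073741824 then "size: XL" else "") := by
  rw [get_pr_size_label_go, goA5]; simp [PR_SIZES, PR_SIZE_LABELS]
theorem goA3 (t : Int) : get_pr_size_label_go t 3 =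
    (if t < 250 then "size: M" else if t < 1000 then "size: L" else
     if t < 1073741824 then "size: XL" else "") := by
  rw [get_pr_size_label_go, goA4]; simp [PR_SIZES, PR_SIZE_LABELS]
theorem goA2 (t : Int) : get_pr_size_label_go t 2 =
    (if t < 50 then "size: S" else if t < 250 then "size: M" else
     if t < 1000 then "size: L" else if t < 1073741824 then "size: XL" else "") := by
  rw [get_pr_size_label_go, goA3]; simp [PR_SIZES, PR_SIZE_LABELS]
theorem goA1 (t : Int) : get_pr_size_label_go t 1 =
    (if t < 10 then "size: XS" else if t < 50 then "size: S" else
     if t < 250 then "size: M" else if t < 1000 then "size: L" else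
     if t < 1073741824 then "size: XL" else "") := by
  rw [get_pr_size_label_go, goA2]; simp [PR_SIZES, PR_SIZE_LABELS]
theorem aEval (t : Int) : get_pr_size_label t =
    (if t < 0 then "size: U" else if t < 10 then "size: XS" else
     if t < 50 then "size: S" else if t < 250 then "size: M" else
     if t < 1000 then "size: L" else if t < 1073741824 then "size: XL" else "") := by
  unfold get_pr_size_label
  rw [get_pr_size_label_go, goA1]; simp [PR_SIZES, PR_SIZE_LABELS]

-- evaluation of the bisect_right call tree on the 6-element table
theorem bs00 (t : Int) : pvBisectRight [0, 10, 50, 250, 1000, 1073741824] t 0 0 = 0 := by rw [pvBisectRight]; simp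
theorem bs11 (t : Int) : pvBisectRight [0, 10, 50, 250, 1000, 1073741824] t 1 1 = 1 := by rw [pvBisectRight]; simp
theorem bs22 (t : Int) : pvBisectRight [0, 10, 50, 250, 1000, 1073741824] t 2 2 = 2 := by rw [pvBisectRight]; simp
theorem bs33 (t : Int) : pvBisectRight [0, 10, 50, 250, 1000, 1073741824] t 3 3 = 3 := by rw [pvBisectRight]; simp
theorem bs44 (t : Int) : pvBisectRight [0, 10, 50, 250, 1000, 1073741824] t 4 4 = 4 := by rw [pvBisectRight]; simp
theorem bs55 (t : Int) : pvBisectRight [0, 10, 50, 250, 1000, 1073741824] t 5 5 = 5 := by rw [pvBisectRight]; simp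
theorem bs66 (t : Int) : pvBisectRight [0, 10, 50, 250, 1000, 1073741824] t 6 6 = 6 := by rw [pvBisectRight]; simp
theorem bs01 (t : Int) : pvBisectRight [0, 10, 50, 250, 1000, 1073741824] t 0 1 = (if t < 0 then 0 else 1) := by
  rw [pvBisectRight]; norm_num [PR_SIZES, bs00, bs11]
theorem bs23 (t : Int) : pvBisectRight [0, 10, 50, 250, 1000, 1073741824] t 2 3 = (if t < 50 then 2 else 3) := by
  rw [pvBisectRight]; norm_num [PR_SIZES, bs22, bs33]
theorem bs45 (t : Int) : pvBisectRight [0, 10, 50, 250, 1000, 1073741824] t 4 5 = (if t < 1000 then 4 else 5) := by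
  rw [pvBisectRight]; norm_num [PR_SIZES, bs44, bs55]
theorem bs03 (t : Int) : pvBisectRight [0, 10, 50, 250, 1000, 1073741824] t 0 3 =
    (if t < 10 then (if t < 0 then 0 else 1) else (if t < 50 then 2 else 3)) := by
  rw [pvBisectRight]; norm_num [PR_SIZES, bs01, bs23]
theorem bs46 (t : Int) : pvBisectRight [0, 10, 50, 250, 1000, 1073741824] t 4 6 =
    (if t < 1073741824 then (if t < 1000 then 4 else 5) else 6) := by
  rw [pvBisectRight]; norm_num [PR_SIZES, bs45, bs66]
theorem bEval (t : Int) : get_pr_size_label_alt t =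
    (if t < 0 then "size: U" else if t < 10 then "size: XS" else
     if t < 50 then "size: S" else if t < 250 then "size: M" else
     if t < 1000 then "size: L" else if t < 1073741824 then "size: XL" else "") := by
  unfold get_pr_size_label_alt
  rw [pvBisectRight]
  norm_num [PR_SIZES, PR_SIZE_LABELS, bs03, bs46]
  split_ifs <;> first | rfl | omega

-- ===== VERDICT (by name: the statement is the Claim_ definition above) =====
theorem get_pr_size_label_spec : Claim_equal_get_pr_size_label := by
  intro t _
  unfold Spec_get_pr_size_label
  rw [aEval, bEval]
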